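-- pv_equiv track=rewrite | github.com/MasterofNull/NixOS-Dev-Quick-Deploy | ai-stack/agentic-patterns/react_pattern.py | _is_task_complete
-- ===== SOURCE A (Python) =====
-- def _is_task_complete(thought: str) -> bool:
--     """Check if task is complete"""
--     completion_keywords = [
--         "final answer",
--         "the answer is",
--         "i can conclude",
--         "task complete",
--         "finished",
--     ]
--
--     thought_lower = thought.lower()
--     return any(kw in thought_lower for kw in completion_keywords)
-- ===== SOURCE B (Python) =====
-- def _is_task_complete(thought: str) -> bool:
--     """Check if task is complete.
--
--     Single left-to-right scan: at each position test whether one of the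
--     completion keywords starts there (str.startswith with a tuple), instead
--     of running an independent substring search per keyword.
--     """
--     keywords = (
--         "final answer",
--         "the answer is",
--         "i can conclude",
--         "task complete",
--         "finished",
--     )
--     t = thought.lower()
--     for i in range(len(t)):
--         if t.startswith(keywords, i):
--             return True
--     return False
-- ===== Notes on version B (the rewrite author's own statement) =====
-- stated objective: alternative
-- what changed: Replaced the five independent substring-membership scans (any(kw in t)) with one left-to-right pass over the lowered text that checks at each position whether any keyword starts there (startswith with a tuple).
import Mathlib
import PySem

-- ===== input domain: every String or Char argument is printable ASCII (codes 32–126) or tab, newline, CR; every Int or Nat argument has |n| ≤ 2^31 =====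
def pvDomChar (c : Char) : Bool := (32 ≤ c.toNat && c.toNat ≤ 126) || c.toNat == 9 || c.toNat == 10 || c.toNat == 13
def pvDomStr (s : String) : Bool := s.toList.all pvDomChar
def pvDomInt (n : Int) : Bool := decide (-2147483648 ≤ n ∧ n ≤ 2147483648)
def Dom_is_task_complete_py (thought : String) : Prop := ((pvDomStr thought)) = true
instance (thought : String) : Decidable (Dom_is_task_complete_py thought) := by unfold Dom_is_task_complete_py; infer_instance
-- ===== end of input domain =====

-- B replaces the per-keyword substring scans with one left-to-right pass that
-- checks a keyword prefix at each position (objective: alternative).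

-- ===== PORT A =====
def pvCompletionKeywords : List String :=
  ["final answer", "the answer is", "i can conclude", "task complete", "finished"]

def is_task_complete_py (thought : String) : Bool :=
  let thought_lower := PySem.Str.lower thought
  pvCompletionKeywords.any (fun kw => PySem.Str.isIn kw thought_lower)

-- ===== PORT B =====
def pvKeywordsB : List String :=
  ["final answer", "the answer is", "i can conclude", "task complete", "finished"]

-- the 'for i in range(len(t)): if t.startswith(keywords, i): return True' loop,
-- as structural recursion over the suffixes of the lowered text
def pvScanB : List Char → Bool
  | [] => false
  | c :: rest =>
      pvKeywordsB.any (fun kw => PySem.Chars.startswith (c :: rest) kw.toList) || pvScanB rest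

def is_task_complete_py_alt (thought : String) : Bool :=
  pvScanB (PySem.Chars.lower thought.toList)

-- ===== PRECONDITION & SPEC =====
def Spec_is_task_complete_py (thought : String) (out : Bool) : Prop := out = is_task_complete_py_alt thought
instance (thought : String) (out : Bool) : Decidable (Spec_is_task_complete_py thought out) := by unfold Spec_is_task_complete_py; infer_instance

-- ===== CLAIM (what is proved, stated in full; the proofs are below) =====
def Claim_equal_is_task_complete_py : Prop := ∀ (thought : String), Dom_is_task_complete_py thought → Spec_is_task_complete_py thought (is_task_complete_py thought)

-- ===== LEMMAS AND PROOFS =====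

-- the scan finds exactly the positions where some keyword is a prefix of a suffix
theorem pvScanB_iff (s : List Char) :
    pvScanB s = true ↔ ∃ kw ∈ pvKeywordsB, ∃ j, j < s.length ∧ kw.toList <+: s.drop j := by
  induction s with
  | nil => simp [pvScanB]
  | cons c rest ih =>
    simp only [pvScanB, Bool.or_eq_true, ih, List.any_eq_true, PySem.Chars.startswith_iff]
    constructor
    · rintro (⟨kw, hkw, hp⟩ | ⟨kw, hkw, j, hj, hp⟩)
      · exact ⟨kw, hkw, 0, by simp, by simpa using hp⟩
      · exact ⟨kw, hkw, j + 1, by simpa using hj, by simpa using hp⟩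
    · rintro ⟨kw, hkw, j, hj, hp⟩
      cases j with
      | zero => exact Or.inl ⟨kw, hkw, by simpa using hp⟩
      | succ j => exact Or.inr ⟨kw, hkw, j, by simpa using hj, by simpa using hp⟩

-- every keyword is nonempty, so a prefix match can only occur strictly inside the text
theorem pvKw_ne_nil : ∀ kw ∈ pvKeywordsB, kw.toList ≠ [] := by decide

theorem pv_infix_iff_bounded (kw s : List Char) (hkw : kw ≠ []) :
    kw <:+: s ↔ ∃ j, j < s.length ∧ kw <+: s.drop j := by
  rw [← PySem.Chars.isIn_iff_infix, ← PySem.Chars.exists_prefix_drop_iff_isIn]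
  constructor
  · rintro ⟨j, hp⟩
    by_cases hj : j < s.length
    · exact ⟨j, hj, hp⟩
    · exfalso
      rw [List.drop_eq_nil_of_le (le_of_not_gt hj)] at hp
      exact hkw (List.prefix_nil.mp hp)
  · rintro ⟨j, _, hp⟩
    exact ⟨j, hp⟩

-- ===== VERDICT (by name: the statement is the Claim_ definition above) =====
theorem is_task_complete_py_spec : Claim_equal_is_task_complete_py := by
  intro thought _
  unfold Spec_is_task_complete_py
  rw [Bool.eq_iff_iff]
  simp only [is_task_complete_py, is_task_complete_py_alt, List.any_eq_true,
    PySem.Str.isIn_iff_infix, PySem.Str.toList_lower, pvScanB_iff]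
  constructor
  · rintro ⟨kw, hkw, h⟩
    exact ⟨kw, hkw, (pv_infix_iff_bounded _ _ (pvKw_ne_nil kw hkw)).1 h⟩
  · rintro ⟨kw, hkw, h⟩
    exact ⟨kw, hkw, (pv_infix_iff_bounded _ _ (pvKw_ne_nil kw hkw)).2 h⟩
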